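-- pv_equiv track=rewrite | github.com/nasa-jpl/ION-DTN | tests/pylib/blocklist.py | lengthBlocksToBlocks
-- ===== SOURCE A (Python) =====
-- def lengthBlocksToBlocks(lengthBlocks):
--     toReturn = [ ]
--     lastEnd = None
--     for i in lengthBlocks:
--         if (lastEnd == None):
--             toReturn.append((i[0], i[0] + i[1] - 1))
--             lastEnd = i[0] + i[1] - 1
--         else:
--             toReturn.append((lastEnd + i[0], lastEnd + i[0] + i[1] - 1))
--             lastEnd = lastEnd + i[0] + i[1] - 1
--     return toReturn
-- ===== SOURCE B (Python) =====
-- def lengthBlocksToBlocks(lengthBlocks):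
--     # two-pass: prefix sums of (a+l), then derive each range from its
--     # cumulative value, its own length and its index (no threaded lastEnd)
--     cum = []
--     t = 0
--     for (a, l) in lengthBlocks:
--         t += a + l
--         cum.append(t)
--     return [(c - k - l, c - k - 1)
--             for k, (c, (_, l)) in enumerate(zip(cum, lengthBlocks))]
-- ===== Notes on version B (the rewrite author's own statement) =====
-- stated objective: alternative
-- what changed: Replaces the single loop threading a lastEnd accumulator (with a None special case for the first block) by two uniform passes: prefix sums of a+l, then each range derived from its cumulative value, its own length and its index as (c-k-l, c-k-1).
import Mathlib
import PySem

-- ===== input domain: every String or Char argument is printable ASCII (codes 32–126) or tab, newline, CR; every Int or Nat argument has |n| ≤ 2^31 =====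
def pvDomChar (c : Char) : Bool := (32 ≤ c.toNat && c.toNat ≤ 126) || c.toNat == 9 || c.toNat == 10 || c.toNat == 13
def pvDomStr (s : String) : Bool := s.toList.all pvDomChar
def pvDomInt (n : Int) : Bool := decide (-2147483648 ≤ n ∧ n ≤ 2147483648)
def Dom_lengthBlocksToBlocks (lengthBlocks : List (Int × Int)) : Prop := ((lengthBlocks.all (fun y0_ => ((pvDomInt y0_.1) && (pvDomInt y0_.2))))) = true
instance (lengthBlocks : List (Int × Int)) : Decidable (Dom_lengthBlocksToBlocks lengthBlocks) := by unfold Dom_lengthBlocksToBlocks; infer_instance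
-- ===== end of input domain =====

-- B replaces A's threaded lastEnd accumulator by two passes (prefix sums, then an
-- index-based zip deriving each range from its cumulative value); objective: alternative decomposition.

-- ===== PORT A =====
-- A's for-loop over lengthBlocks with state (toReturn, lastEnd : Option Int)
def lbGoA : List (Int × Int) → List (Int × Int) → Option Int → List (Int × Int)
  | [], toReturn, _ => toReturn
  | i :: rest, toReturn, none =>
      lbGoA rest (toReturn ++ [(i.1, i.1 + i.2 - 1)]) (some (i.1 + i.2 - 1))
  | i :: rest, toReturn, some lastEnd =>
      lbGoA rest (toReturn ++ [(lastEnd + i.1, lastEnd + i.1 + i.2 - 1)])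
        (some (lastEnd + i.1 + i.2 - 1))

def lengthBlocksToBlocks (lengthBlocks : List (Int × Int)) : List (Int × Int) :=
  lbGoA lengthBlocks [] none

-- ===== PORT B =====
-- first pass of Source B: prefix sums of a+l (state (t, cum))
def lbCumB (lengthBlocks : List (Int × Int)) : Int × List Int :=
  lengthBlocks.foldl (fun st p => (st.1 + p.1 + p.2, st.2 ++ [st.1 + p.1 + p.2])) (0, [])

def lengthBlocksToBlocks_alt (lengthBlocks : List (Int × Int)) : List (Int × Int) :=
  ((lbCumB lengthBlocks).2.zip lengthBlocks).zipIdx.map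
    (fun e => (e.1.1 - (e.2 : Int) - e.1.2.2, e.1.1 - (e.2 : Int) - 1))

-- ===== PRECONDITION & SPEC =====
def Spec_lengthBlocksToBlocks (lengthBlocks : List (Int × Int)) (out : List (Int × Int)) : Prop := out = lengthBlocksToBlocks_alt lengthBlocks
instance (lengthBlocks : List (Int × Int)) (out : List (Int × Int)) : Decidable (Spec_lengthBlocksToBlocks lengthBlocks out) := by unfold Spec_lengthBlocksToBlocks; infer_instance

-- ===== CLAIM (what is proved, stated in full; the proofs are below) =====
def Claim_equal_lengthBlocksToBlocks : Prop := ∀ (lengthBlocks : List (Int × Int)), Dom_lengthBlocksToBlocks lengthBlocks → Spec_lengthBlocksToBlocks lengthBlocks (lengthBlocksToBlocks lengthBlocks)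

-- ===== LEMMAS AND PROOFS =====

-- mathematical reference value: absolute ranges starting after end `e`
def absFrom : Int → List (Int × Int) → List (Int × Int)
  | _, [] => []
  | e, (a, l) :: rest => (e + a, e + a + l - 1) :: absFrom (e + a + l - 1) rest

-- prefix sums starting from running total `t`
def cumFrom : Int → List (Int × Int) → List Int
  | _, [] => []
  | t, (a, l) :: rest => (t + a + l) :: cumFrom (t + a + l) rest

theorem lbGoA_some (xs : List (Int × Int)) :
    ∀ (acc : List (Int × Int)) (e : Int), lbGoA xs acc (some e) = acc ++ absFrom e xs := by
  induction xs with
  | nil => intro acc e; simp [lbGoA, absFrom]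
  | cons i rest ih =>
      intro acc e
      obtain ⟨a, l⟩ := i
      simp [lbGoA, absFrom, ih]

theorem portA_eq (xs : List (Int × Int)) : lengthBlocksToBlocks xs = absFrom 0 xs := by
  cases xs with
  | nil => simp [lengthBlocksToBlocks, lbGoA, absFrom]
  | cons i rest =>
      obtain ⟨a, l⟩ := i
      simp only [lengthBlocksToBlocks, lbGoA, lbGoA_some, absFrom]
      norm_num

theorem lbCumB_snd (xs : List (Int × Int)) :
    ∀ (t : Int) (acc : List Int),
      (xs.foldl (fun st p => (st.1 + p.1 + p.2, st.2 ++ [st.1 + p.1 + p.2])) (t, acc)).2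
        = acc ++ cumFrom t xs := by
  induction xs with
  | nil => intro t acc; simp [cumFrom]
  | cons i rest ih =>
      intro t acc
      obtain ⟨a, l⟩ := i
      simp [List.foldl, cumFrom, ih]

theorem zip_cum_eq (xs : List (Int × Int)) :
    ∀ (t : Int) (k : Nat),
      (((cumFrom t xs).zip xs).zipIdx k).map
          (fun e => (e.1.1 - (e.2 : Int) - e.1.2.2, e.1.1 - (e.2 : Int) - 1))
        = absFrom (t - k) xs := by
  induction xs with
  | nil => intro t k; simp [cumFrom, absFrom]
  | cons i rest ih =>
      intro t k
      obtain ⟨a, l⟩ := i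
      simp only [cumFrom, absFrom, List.zip_cons_cons, List.zipIdx_cons, List.map_cons]
      have h := ih (t + a + l) (k + 1)
      push_cast at h
      rw [h]
      have e1 : t + a + l - (k:Int) - l = t - k + a := by ring
      have e2 : t + a + l - (k:Int) - 1 = t - k + a + l - 1 := by ring
      have e3 : t + a + l - ((k:Int) + 1) = t - k + a + l - 1 := by ring
      rw [e1, e2, e3]

theorem portB_eq (xs : List (Int × Int)) : lengthBlocksToBlocks_alt xs = absFrom 0 xs := by
  have h0 : (lbCumB xs).2 = cumFrom 0 xs := lbCumB_snd xs 0 []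
  have h := zip_cum_eq xs 0 0
  simpa [lengthBlocksToBlocks_alt, h0] using h

-- ===== VERDICT (by name: the statement is the Claim_ definition above) =====
theorem lengthBlocksToBlocks_spec : Claim_equal_lengthBlocksToBlocks := by
  intro xs _
  unfold Spec_lengthBlocksToBlocks
  rw [portA_eq, portB_eq]
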